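-- pv_equiv track=rewrite | github.com/Daveedwardsracing/KartIQ | backend/app/analysis.py | _match_header
-- ===== SOURCE A (Python) =====
-- def _match_header(headers: list[str], fragments: list[str]) -> str | None:
--     lowered_headers = [(header.lower(), header) for header in headers]
--     for fragment in fragments:
--         fragment = fragment.lower()
--         exact = next((original for lower_header, original in lowered_headers if lower_header == fragment), None)
--         if exact:
--             return exact
--         starts_with = next((original for lower_header, original in lowered_headers if lower_header.startswith(fragment)), None)
--         if starts_with:
--             return starts_with
--         contains = next((original for lower_header, original in lowered_headers if fragment in lower_header), None)
--         if contains: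
--             return contains
--     return None
-- ===== SOURCE B (Python) =====
-- def _match_header(headers: list[str], fragments: list[str]) -> str | None:
--     pairs = [(h.lower(), h) for h in headers]
--     for fragment in fragments:
--         frag = fragment.lower()
--         exact = starts = contains = None
--         for low, orig in pairs:
--             if exact is None and low == frag:
--                 exact = orig
--             if starts is None and low.startswith(frag):
--                 starts = orig
--             if contains is None and frag in low:
--                 contains = orig
--         if exact:
--             return exact
--         if starts:
--             return starts
--         if contains:
--             return contains
--     return None
-- ===== Notes on version B (the rewrite author's own statement) =====
-- stated objective: alternative
-- what changed: Replaces A's three separate generator scans per fragment by a single pass over the header pairs that records the first exact/startswith/contains candidates simultaneously, then applies the same truthiness chain.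
import Mathlib
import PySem

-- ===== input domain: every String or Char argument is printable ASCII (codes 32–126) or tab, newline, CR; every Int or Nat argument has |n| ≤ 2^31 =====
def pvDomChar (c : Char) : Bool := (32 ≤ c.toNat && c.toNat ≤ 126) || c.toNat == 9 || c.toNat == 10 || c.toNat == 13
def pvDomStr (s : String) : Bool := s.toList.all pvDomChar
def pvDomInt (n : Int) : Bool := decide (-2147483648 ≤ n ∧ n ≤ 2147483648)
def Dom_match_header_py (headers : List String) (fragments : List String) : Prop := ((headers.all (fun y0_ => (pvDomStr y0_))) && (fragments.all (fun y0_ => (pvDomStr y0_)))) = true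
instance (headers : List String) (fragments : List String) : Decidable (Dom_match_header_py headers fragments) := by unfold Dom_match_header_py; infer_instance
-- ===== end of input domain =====

-- B merges A's three per-fragment first-match scans into one pass over the header pairs (alternative decomposition, same truthiness semantics).


-- ===== PORT A =====
-- truthiness of Python's `if x:` on a str-or-None value
def pyTruthy (o : Option String) : Bool :=
  match o with
  | some s => !(s == "")
  | none => false

-- A's per-fragment loop: three sequential first-match scans (next(...) = find?)
def matchHeaderLoopA (lowered : List (String × String)) : List String → Option String
  | [] => none
  | fragment :: rest =>
    let frag := PySem.Str.lower fragment
    let exact := (lowered.find? (fun lo => lo.1 == frag)).map Prod.snd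
    if pyTruthy exact then exact
    else
      let startsWith := (lowered.find? (fun lo => PySem.Str.startswith lo.1 frag)).map Prod.snd
      if pyTruthy startsWith then startsWith
      else
        let contains := (lowered.find? (fun lo => PySem.Str.isIn frag lo.1)).map Prod.snd
        if pyTruthy contains then contains
        else matchHeaderLoopA lowered rest

def match_header_py (headers : List String) (fragments : List String) : Option String :=
  matchHeaderLoopA (headers.map (fun h => (PySem.Str.lower h, h))) fragments

-- ===== PORT B =====
-- B's single-pass step: record the first exact / startswith / contains candidates
def bStep (frag : String) (acc : Option String × Option String × Option String)
    (lo : String × String) : Option String × Option String × Option String :=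
  (if acc.1.isNone && lo.1 == frag then some lo.2 else acc.1,
   if acc.2.1.isNone && PySem.Str.startswith lo.1 frag then some lo.2 else acc.2.1,
   if acc.2.2.isNone && PySem.Str.isIn frag lo.1 then some lo.2 else acc.2.2)

def matchHeaderLoopB (pairs : List (String × String)) : List String → Option String
  | [] => none
  | fragment :: rest =>
    let frag := PySem.Str.lower fragment
    let r := pairs.foldl (bStep frag) (none, none, none)
    if pyTruthy r.1 then r.1
    else if pyTruthy r.2.1 then r.2.1
    else if pyTruthy r.2.2 then r.2.2
    else matchHeaderLoopB pairs rest

def match_header_py_alt (headers : List String) (fragments : List String) : Option String :=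
  matchHeaderLoopB (headers.map (fun h => (PySem.Str.lower h, h))) fragments

-- ===== PRECONDITION & SPEC =====
def Spec_match_header_py (headers : List String) (fragments : List String) (out : Option String) : Prop := out = match_header_py_alt headers fragments
instance (headers : List String) (fragments : List String) (out : Option String) : Decidable (Spec_match_header_py headers fragments out) := by unfold Spec_match_header_py; infer_instance

-- ===== CLAIM (what is proved, stated in full; the proofs are below) =====
def Claim_equal_match_header_py : Prop := ∀ (headers : List String) (fragments : List String), Dom_match_header_py headers fragments → Spec_match_header_py headers fragments (match_header_py headers fragments)

-- ===== LEMMAS AND PROOFS =====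

-- B's fold computes, in one pass, exactly the three first-match scans of A
theorem foldl_bStep_eq (frag : String) (pairs : List (String × String))
    (e s c : Option String) :
    pairs.foldl (bStep frag) (e, s, c) =
      (e.or ((pairs.find? (fun lo => lo.1 == frag)).map Prod.snd),
       s.or ((pairs.find? (fun lo => PySem.Str.startswith lo.1 frag)).map Prod.snd),
       c.or ((pairs.find? (fun lo => PySem.Str.isIn frag lo.1)).map Prod.snd)) := by
  induction pairs generalizing e s c with
  | nil => cases e <;> cases s <;> cases c <;> simp
  | cons p rest ih =>
    simp only [List.foldl_cons, List.find?_cons]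
    rw [ih]
    by_cases h1 : (p.1 == frag) = true <;>
    by_cases h2 : PySem.Str.startswith p.1 frag = true <;>
    by_cases h3 : PySem.Str.isIn frag p.1 = true <;>
    cases e <;> cases s <;> cases c <;>
    simp_all [bStep] <;>
    rw [show (p.1 == frag) = false from beq_eq_false_iff_ne.mpr (by simpa using h1)]

theorem loopA_eq_loopB (pairs : List (String × String)) (fragments : List String) :
    matchHeaderLoopA pairs fragments = matchHeaderLoopB pairs fragments := by
  induction fragments with
  | nil => rfl
  | cons fragment rest ih =>
    simp only [matchHeaderLoopA, matchHeaderLoopB, foldl_bStep_eq, ih]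
    rfl

-- ===== VERDICT (by name: the statement is the Claim_ definition above) =====
theorem match_header_py_spec : Claim_equal_match_header_py := by
  intro headers fragments _
  unfold Spec_match_header_py match_header_py match_header_py_alt
  exact loopA_eq_loopB _ _
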